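-- pv_equiv track=rewrite | github.com/coinjinja/moosefs_exporter | moosefs_exporter.py | labelmasks_to_str
-- ===== SOURCE A (Python) =====
-- def label_id_to_char(id):
--     return chr(ord('A')+id)
--
-- def labelmask_to_str(labelmask):
--     str = ""
--     m = 1
--     for i in range(26):
--         if labelmask & m:
--             str += label_id_to_char(i)
--         m <<= 1
--     return str
--
-- def labelmasks_to_str(labelmasks):
--     if labelmasks[0] == 0:
--         return "*"
--     r = []
--     for labelmask in labelmasks:
--         if labelmask == 0:
--             break
--         r.append(labelmask_to_str(labelmask))
--     return "+".join(r)
-- ===== SOURCE B (Python) =====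
-- def _mask_str(labelmask):
--     # keep only the 26 bits A ever looks at, then peel set bits from the top
--     m = labelmask & 0x3FFFFFF
--     out = ""
--     while m:
--         i = m.bit_length() - 1
--         out = chr(ord('A') + i) + out
--         m -= 1 << i
--     return out
--
-- def labelmasks_to_str(labelmasks):
--     if labelmasks[0] == 0:
--         return "*"
--     try:
--         end = labelmasks.index(0)
--     except ValueError:
--         end = len(labelmasks)
--     return "+".join(map(_mask_str, labelmasks[:end]))
-- ===== Notes on version B (the rewrite author's own statement) =====
-- stated objective: alternative
-- what changed: Per mask, B masks to the low 26 bits and peels set bits from the top via bit_length (popcount-bounded walk) instead of A's fixed 26-position scan with a shifting probe bit; the outer break-loop becomes an index lookup for the break element, a prefix slice and a join over a map.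
import Mathlib
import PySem

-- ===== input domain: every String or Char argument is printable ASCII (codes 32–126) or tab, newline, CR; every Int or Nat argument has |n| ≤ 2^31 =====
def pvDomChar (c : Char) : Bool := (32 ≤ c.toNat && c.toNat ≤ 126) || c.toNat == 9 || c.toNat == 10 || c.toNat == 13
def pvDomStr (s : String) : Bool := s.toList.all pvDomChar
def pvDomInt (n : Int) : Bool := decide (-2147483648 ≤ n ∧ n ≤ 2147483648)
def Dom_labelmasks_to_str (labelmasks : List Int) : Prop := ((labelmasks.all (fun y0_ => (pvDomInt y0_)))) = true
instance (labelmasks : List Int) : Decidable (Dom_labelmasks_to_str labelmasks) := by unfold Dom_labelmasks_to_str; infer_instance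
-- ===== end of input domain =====

-- B replaces A's fixed 26-position scan per mask by masking to the low 26 bits and peeling set
-- bits from the top (bit_length), and replaces the break-loop by an index lookup + prefix slice
-- + join over a map (alternative decomposition; no mutation in either program).

-- ===== PORT A =====

-- chr(ord('A')+id)
def label_id_to_char (id : Nat) : Char := Char.ofNat (Char.toNat 'A' + id)

-- str = ""; m = 1; for i in range(26): if labelmask & m: str += chr(ord('A')+i); m <<= 1
-- (string built as List Char per the PySem convention; `labelmask & m` is PySem.Int.band,
--  truthiness of the nonneg result is `≠ 0`; `m <<= 1` is `<<< 1`)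
def labelmask_to_str (labelmask : Int) : List Char :=
  ((List.range 26).foldl
    (fun (st : List Char × Int) i =>
      ((if PySem.Int.band labelmask st.2 ≠ 0 then st.1 ++ [label_id_to_char i] else st.1),
        st.2 <<< (1 : Nat)))
    ([], 1)).1

-- r = []; for labelmask in labelmasks: if labelmask == 0: break; r.append(...)
def labelmasks_loop : List Int → List (List Char)
  | [] => []
  | x :: xs => if x = 0 then [] else labelmask_to_str x :: labelmasks_loop xs

def labelmasks_to_str (labelmasks : List Int) : String :=
  match PySem.List.pyGet? labelmasks 0 with
  | none => ""          -- labelmasks[0] raises IndexError on []; excluded by Pre_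
  | some h =>
    if h = 0 then "*"
    else String.mk (PySem.Chars.join ['+'] (labelmasks_loop labelmasks))

-- ===== PORT B =====

-- while m: i = m.bit_length() - 1; out = chr(ord('A')+i) + out; m -= 1 << i
-- (m = labelmask & 0x3FFFFFF is nonnegative, so it is carried as a Nat)
def pv_mask_go (m : Nat) (out : List Char) : List Char :=
  if h0 : m = 0 then out
  else
    let i := PySem.Int.bitLength (m : Int) - 1
    pv_mask_go (m - 2 ^ i) (Char.ofNat (Char.toNat 'A' + i) :: out)
termination_by m
decreasing_by
  exact Nat.sub_lt (Nat.pos_of_ne_zero h0) (Nat.two_pow_pos _)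

-- m = labelmask & 0x3FFFFFF; then the peel loop
def pv_mask_str (labelmask : Int) : List Char :=
  pv_mask_go (PySem.Int.band labelmask 67108863).toNat []

def labelmasks_to_str_alt (labelmasks : List Int) : String :=
  match PySem.List.pyGet? labelmasks 0 with
  | none => ""          -- labelmasks[0] raises IndexError on []; excluded by Pre_
  | some h =>
    if h = 0 then "*"
    else
      -- end = labelmasks.index(0) (or len(labelmasks)); "+".join(map(_mask_str, labelmasks[:end]))
      let e := (PySem.List.index? labelmasks 0).getD labelmasks.length
      String.mk (PySem.Chars.join ['+'] ((labelmasks.take e).map pv_mask_str))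

-- ===== PRECONDITION & SPEC =====
-- Pre_ excludes only the empty list, on which the first-element access raises IndexError in both A and B.
def Pre_labelmasks_to_str (labelmasks : List Int) : Prop := labelmasks ≠ []
instance (labelmasks : List Int) : Decidable (Pre_labelmasks_to_str labelmasks) := by unfold Pre_labelmasks_to_str; infer_instance

def pvWitness_labelmasks_to_str : List Int := [5, -7, 0, 3]

def Spec_labelmasks_to_str (labelmasks : List Int) (out : String) : Prop := out = labelmasks_to_str_alt labelmasks
instance (labelmasks : List Int) (out : String) : Decidable (Spec_labelmasks_to_str labelmasks out) := by unfold Spec_labelmasks_to_str; infer_instance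

-- ===== CLAIM (what is proved, stated in full; the proofs are below) =====
def Claim_equal_labelmasks_to_str : Prop := ∀ (labelmasks : List Int), Dom_labelmasks_to_str labelmasks → Pre_labelmasks_to_str labelmasks → Spec_labelmasks_to_str labelmasks (labelmasks_to_str labelmasks)

-- ===== LEMMAS AND PROOFS =====

-- the canonical segment: letters of the set bits (ascending) of n, n < 2^26
def pvBits (n : Nat) : List Char :=
  ((List.range 26).filter (fun i => n.testBit i)).map (fun i => Char.ofNat (Char.toNat 'A' + i))

-- bit i (i < 26) of the complement 2^26-1-r, r < 2^26
theorem pv_compl_testBit (w : Nat) :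
    ∀ r < 2 ^ w, ∀ i, (2 ^ w - 1 - r).testBit i = (decide (i < w) && !r.testBit i) := by
  induction w with
  | zero => intro r hr i; interval_cases r; simp
  | succ w ih =>
    intro r hr i
    cases i with
    | zero =>
      simp only [Nat.testBit_zero]
      have h2 : 0 < 2 ^ w := Nat.two_pow_pos _
      have : (2 ^ (w + 1) - 1 - r) % 2 = 1 - r % 2 := by
        rw [pow_succ] at *; omega
      rcases Nat.mod_two_eq_zero_or_one r with h | h <;> simp [this, h]
    | succ i =>
      have hd : (2 ^ (w + 1) - 1 - r) / 2 = 2 ^ w - 1 - r / 2 := by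
        rw [pow_succ] at *; omega
      have hr2 : r / 2 < 2 ^ w := by rw [pow_succ] at hr; omega
      simp only [Nat.testBit_succ, hd, ih (r / 2) hr2 i]
      simp

-- the 26-bit truncation A's bit tests see, as a Nat
def pvTrunc (x : Int) : Nat := (PySem.Int.band x 67108863).toNat

theorem pvTrunc_lt (x : Int) : pvTrunc x < 2 ^ 26 := by
  unfold pvTrunc PySem.Int.band
  have hb : (0:Int) ≤ 67108863 := by norm_num
  by_cases hx : 0 ≤ x
  · rw [if_pos hx, if_pos hb, Int.toNat_natCast]
    have := Nat.and_le_right (n := x.toNat) (m := (67108863 : Int).toNat)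
    have h67 : ((67108863 : Int)).toNat = 67108863 := rfl
    omega
  · rw [if_neg hx, if_pos hb, Int.toNat_natCast]
    have h67 : ((67108863 : Int)).toNat = 67108863 := rfl
    omega

-- A's test `labelmask & 2^i != 0` reads bit i of the truncation
theorem pv_band_testBit (x : Int) (i : Nat) (hi : i < 26) :
    (PySem.Int.band x (2 ^ i) ≠ 0) ↔ (pvTrunc x).testBit i = true := by
  have h2i : (0:Int) ≤ 2 ^ i := by positivity
  have hcast : ((2:Int) ^ i).toNat = 2 ^ i := by
    rw [show ((2:Int) ^ i) = ((2 ^ i : Nat) : Int) by push_cast; ring]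
    exact Int.toNat_natCast _
  unfold pvTrunc PySem.Int.band
  by_cases hx : 0 ≤ x
  · simp only [if_pos hx, if_pos h2i, if_pos (by norm_num : (0:Int) ≤ 67108863), hcast]
    rw [show ((67108863 : Int).toNat) = 2 ^ 26 - 1 from rfl]
    rw [Nat.and_two_pow_sub_one_eq_mod, Int.toNat_natCast]
    rw [Nat.and_two_pow, Nat.testBit_mod_two_pow]
    have h2 : 0 < 2 ^ i := Nat.two_pow_pos _
    cases hb : (x.toNat).testBit i <;> simp [hi]
  · simp only [if_neg hx, if_pos h2i, if_pos (by norm_num : (0:Int) ≤ 67108863), hcast]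
    set k := (-x - 1).toNat with hk
    rw [show ((67108863 : Int).toNat) = 2 ^ 26 - 1 from rfl]
    rw [Nat.land_comm (2 ^ 26 - 1) k, Nat.and_two_pow_sub_one_eq_mod]
    have hrlt : k % 2 ^ 26 < 2 ^ 26 := Nat.mod_lt _ (by norm_num)
    rw [Int.toNat_natCast, pv_compl_testBit 26 (k % 2 ^ 26) hrlt i, Nat.testBit_mod_two_pow]
    rw [Nat.two_pow_and]
    have h2 : 0 < 2 ^ i := Nat.two_pow_pos _
    cases hb : k.testBit i <;> simp [hi]

-- ---- A side: the fold computes pvBits of the truncation ----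

theorem pv_foldA (x : Int) :
    ∀ (len s : Nat), s + len = 26 → ∀ (acc : List Char),
    ((List.range' s len).foldl
      (fun (st : List Char × Int) i =>
        ((if PySem.Int.band x st.2 ≠ 0 then st.1 ++ [label_id_to_char i] else st.1),
          st.2 <<< (1 : Nat)))
      (acc, 2 ^ s)).1
      = acc ++ ((List.range' s len).filter (fun i => (pvTrunc x).testBit i)).map
          (fun i => Char.ofNat (Char.toNat 'A' + i)) := by
  intro len
  induction len with
  | zero => intro s _ acc; simp
  | succ len ih =>
    intro s hs acc
    rw [List.range'_succ]
    simp only [List.foldl_cons, List.filter_cons]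
    have hsh : (2:Int) ^ s <<< (1:Nat) = 2 ^ (s + 1) := by
      rw [Int.shiftLeft_eq]; ring
    have hbit := pv_band_testBit x s (by omega)
    by_cases hb : (pvTrunc x).testBit s = true
    · rw [if_pos (hbit.mpr hb)]
      simp only [hsh]
      rw [ih (s + 1) (by omega) (acc ++ [label_id_to_char s])]
      simp [hb, label_id_to_char]
    · rw [if_neg (fun hne => hb (hbit.mp hne))]
      simp only [hsh]
      rw [ih (s + 1) (by omega) acc]
      simp [hb]

theorem pv_A_eq_bits (x : Int) : labelmask_to_str x = pvBits (pvTrunc x) := by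
  unfold labelmask_to_str pvBits
  rw [List.range_eq_range']
  have := pv_foldA x 26 0 (by omega) []
  simpa using this

-- ---- B side: the peel loop computes pvBits too ----

theorem pv_go_eq_bits (n : Nat) (hn : n < 2 ^ 26) :
    ∀ out, pv_mask_go n out = pvBits n ++ out := by
  induction n using Nat.strong_induction_on with
  | _ n ih =>
    intro out
    by_cases h0 : n = 0
    · subst h0
      rw [pv_mask_go]
      simp [pvBits, Nat.zero_testBit]
    · rw [pv_mask_go]
      simp only [dif_neg h0]
      set t := PySem.Int.bitLength (n : Int) - 1 with ht
      have hne : (n : Int) ≠ 0 := by exact_mod_cast h0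
      have hlow : 2 ^ t ≤ n := by
        have := PySem.Int.two_pow_bitLength_le (n : Int) hne
        simpa using this
      have hbl : 1 ≤ PySem.Int.bitLength (n : Int) := by
        by_contra hno
        have h1 := PySem.Int.lt_two_pow_bitLength (n : Int)
        have : PySem.Int.bitLength (n : Int) = 0 := by omega
        rw [this] at h1; simp at h1; omega
      have hhigh : n < 2 ^ (t + 1) := by
        have h1 := PySem.Int.lt_two_pow_bitLength (n : Int)
        have : t + 1 = PySem.Int.bitLength (n : Int) := by omega
        rw [this]; simpa using h1
      have h2t : 0 < 2 ^ t := Nat.two_pow_pos _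
      set n' := n - 2 ^ t with hn'
      have hdecomp : n = 2 ^ t + n' := by omega
      have hn'lt : n' < 2 ^ t := by omega
      have ht26 : t < 26 := by
        by_contra hge
        have : 2 ^ 26 ≤ 2 ^ t := Nat.pow_le_pow_right (by omega) (by omega)
        omega
      rw [ih n' (by omega) (by omega) _]
      -- pvBits n = pvBits n' ++ [letter t]
      have hbit_t : n.testBit t = true := by
        rw [hdecomp, Nat.testBit_two_pow_add_eq,
            Nat.testBit_lt_two_pow hn'lt]; rfl
      have hbit_lt : ∀ i, i < t → n.testBit i = n'.testBit i := fun i hilt => by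
        rw [hdecomp, Nat.testBit_two_pow_add_gt hilt]
      have hbit_gt : ∀ i, t < i → n.testBit i = false := fun i hgt =>
        Nat.testBit_lt_two_pow (lt_of_lt_of_le hhigh (Nat.pow_le_pow_right (by omega) hgt))
      have hbit_ge' : ∀ i, t ≤ i → n'.testBit i = false := fun i hge =>
        Nat.testBit_lt_two_pow (lt_of_lt_of_le hn'lt (Nat.pow_le_pow_right (by omega) hge))
      have hfil : ∀ B, t < B →
          (List.range B).filter (fun i => n.testBit i)
            = (List.range B).filter (fun i => n'.testBit i) ++ [t] := by
        intro B
        induction B with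
        | zero => omega
        | succ B ihB =>
          intro hB
          rw [List.range_succ]
          by_cases htB : t < B
          · rw [List.filter_append, List.filter_append, ihB htB]
            have : n.testBit B = false := hbit_gt B htB
            have h2 : n'.testBit B = false := hbit_ge' B (by omega)
            simp [this, h2]
          · have htB' : t = B := by omega
            subst htB'
            rw [List.filter_append, List.filter_append]
            have heq : (List.range t).filter (fun i => n.testBit i)
                = (List.range t).filter (fun i => n'.testBit i) := by
              apply List.filter_congr
              intro i hi
              rw [hbit_lt i (List.mem_range.mp hi)]
            rw [heq]
            simp [hbit_t, hbit_ge' t le_rfl]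
      unfold pvBits
      rw [hfil 26 ht26]
      simp

theorem pv_B_eq_bits (x : Int) : pv_mask_str x = pvBits (pvTrunc x) := by
  show pv_mask_go (pvTrunc x) [] = pvBits (pvTrunc x)
  rw [pv_go_eq_bits (pvTrunc x) (pvTrunc_lt x) []]
  simp

theorem pv_seg_eq (x : Int) : labelmask_to_str x = pv_mask_str x := by
  rw [pv_A_eq_bits, pv_B_eq_bits]

-- ---- outer loop: break-loop = take-to-first-zero ----

theorem pv_outer (xs : List Int) :
    labelmasks_loop xs
      = (xs.take ((PySem.List.index? xs 0).getD xs.length)).map labelmask_to_str := by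
  induction xs with
  | nil => simp [labelmasks_loop]
  | cons x xs ih =>
    by_cases hx : x = 0
    · subst hx
      rw [PySem.List.index?_cons_self]
      simp [labelmasks_loop]
    · rw [PySem.List.index?_cons_of_ne xs hx]
      cases hidx : PySem.List.index? xs 0 with
      | none =>
        simp only [labelmasks_loop, if_neg hx, hidx] at *
        simp [ih]
      | some k =>
        simp only [labelmasks_loop, if_neg hx, hidx] at *
        simp [ih]

-- ===== VERDICT (by name: the statement is the Claim_ definition above) =====
theorem labelmasks_to_str_spec : Claim_equal_labelmasks_to_str := by
  intro labelmasks _ hpre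
  unfold Spec_labelmasks_to_str labelmasks_to_str labelmasks_to_str_alt
  cases labelmasks with
  | nil => exact absurd rfl hpre
  | cons h t =>
    have hget : PySem.List.pyGet? (h :: t) (0 : Int) = some h := by
      simp [PySem.List.pyGet?, PySem.List.pyIdx?]
    rw [hget]
    by_cases hh : h = 0
    · simp [hh]
    · simp only [if_neg hh]
      rw [pv_outer (h :: t)]
      congr 1
      refine congrArg _ (List.map_congr_left ?_)
      intro x _
      exact pv_seg_eq x
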